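-- pv_equiv track=rewrite | github.com/har33sh/SoftwareLab | Software_lab/lab 8/16305R013_lab8/problem3/problem3.py | column_collapse
-- ===== SOURCE A (Python) =====
-- def column_collapse(L):
-- 	#Code to search the number x in l.
-- 	#print the number of steps taken to reach x
-- 	#return collapsed_list
-- 	l=L
-- 	x=0
-- 	for lis in l :
-- 		if(len(lis)>x):
-- 			x =len(lis)
--
-- 	for lis in l:
-- 		if(len(lis)<x):
-- 			for i in range(len(lis),x):
-- 				lis.append(0)
-- 	out=[]
-- 	for i in range(0,x):
-- 		tmp=0
-- 		for j in range(0,len(L)):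
-- 			tmp+=l[j][i]
-- 		out.append(tmp)
-- 	return out
-- ===== SOURCE B (Python) =====
-- def column_collapse(L):
--     # Same return value as A; also preserves A's observable in-place padding of the rows.
--     x = max(map(len, L), default=0)
--     out = [0] * x
--     for row in L:
--         row.extend([0] * (x - len(row)))
--         out = [o + v for o, v in zip(out, row)]
--     return out
-- ===== Notes on version B (the rewrite author's own statement) =====
-- stated objective: alternative
-- what changed: Replaces the column-by-column double loop (for each column index, an inner pass over all rows) with a single row-major pass that keeps a running accumulator vector and adds each padded row into it elementwise; the max-length and in-place padding of the rows are preserved.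
import Mathlib
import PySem

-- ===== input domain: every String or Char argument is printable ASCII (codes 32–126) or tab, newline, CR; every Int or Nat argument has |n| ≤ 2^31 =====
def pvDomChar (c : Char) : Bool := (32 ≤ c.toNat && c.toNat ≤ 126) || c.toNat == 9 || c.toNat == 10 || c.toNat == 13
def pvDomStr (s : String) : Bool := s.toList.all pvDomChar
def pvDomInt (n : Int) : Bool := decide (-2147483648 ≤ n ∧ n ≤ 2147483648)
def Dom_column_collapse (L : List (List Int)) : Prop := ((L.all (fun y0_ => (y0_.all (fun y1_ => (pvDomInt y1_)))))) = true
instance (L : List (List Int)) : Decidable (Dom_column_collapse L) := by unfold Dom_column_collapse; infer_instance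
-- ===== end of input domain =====

-- B computes the same column sums by a single row-major pass with a running accumulator
-- vector instead of A's column-by-column double loop; A and B both pad the rows in place
-- (the equivalence proved here is about the return value; B performs the same mutation).

-- ===== PORT A =====
def column_collapse (L : List (List Int)) : List Int :=
  -- l = L; x = 0; for lis in l: if len(lis) > x: x = len(lis)
  let x : Nat := L.foldl (fun x lis => if lis.length > x then lis.length else x) 0
  -- for lis in l: if len(lis) < x: for i in range(len(lis), x): lis.append(0)
  let l : List (List Int) :=
    L.map (fun lis => if lis.length < x then lis ++ List.replicate (x - lis.length) 0 else lis)
  -- out = []; for i in range(0,x): tmp = 0; for j in range(0,len(L)): tmp += l[j][i]; out.append(tmp)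
  -- indexing l[j][i] is always in range here, so pyGetD with a default is exact
  (PySem.List.pyRange 0 (x : Int) 1).foldl
    (fun out i =>
      out ++ [(PySem.List.pyRange 0 (L.length : Int) 1).foldl
        (fun tmp j => tmp + PySem.List.pyGetD (PySem.List.pyGetD l j []) i 0) 0])
    []

-- ===== PORT B =====
def column_collapse_alt (L : List (List Int)) : List Int :=
  -- x = max(map(len, L), default=0)
  let x : Nat := (PySem.List.max? (L.map List.length) (fun y => y)).getD 0
  -- out = [0]*x; for row in L: row.extend([0]*(x-len(row))); out = [o+v for o,v in zip(out,row)]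
  L.foldl
    (fun out row =>
      let row' := row ++ List.replicate (x - row.length) 0
      List.zipWith (fun o v => o + v) out row')
    (List.replicate x 0)

-- ===== PRECONDITION & SPEC =====
def Spec_column_collapse (L : List (List Int)) (out : List Int) : Prop := out = column_collapse_alt L
instance (L : List (List Int)) (out : List Int) : Decidable (Spec_column_collapse L out) := by unfold Spec_column_collapse; infer_instance

-- ===== CLAIM (what is proved, stated in full; the proofs are below) =====
def Claim_equal_column_collapse : Prop := ∀ (L : List (List Int)), Dom_column_collapse L → Spec_column_collapse L (column_collapse L)

-- ===== LEMMAS AND PROOFS =====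

-- the two max-length computations agree
lemma maxlen_eq (L : List (List Int)) :
    L.foldl (fun x lis => if lis.length > x then lis.length else x) 0
      = (PySem.List.max? (L.map List.length) (fun y => y)).getD 0 := by
  have hfun : (fun (x : Nat) (lis : List Int) => if lis.length > x then lis.length else x)
      = (fun (x : Nat) (lis : List Int) => max x lis.length) := by
    funext x lis; by_cases h : lis.length > x <;> simp [h] <;> omega
  rw [hfun]
  cases L with
  | nil => simp [PySem.List.max?]
  | cons a t =>
    rw [show (a :: t).map List.length = a.length :: t.map List.length from rfl,
        PySem.List.max?_id_cons]
    simp only [Option.getD_some, List.foldl_cons]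
    have : ∀ (l : List (List Int)) (b : Nat),
        l.foldl (fun x lis => max x lis.length) b = (l.map List.length).foldl max b := by
      intro l; induction l with
      | nil => intro b; rfl
      | cons h t ih => intro b; simp [List.foldl_cons, ih]
    rw [this, Nat.zero_max]

-- every element of a foldl-max list is bounded by the fold
lemma init_le_foldl_max_nat (l : List Nat) (b : Nat) : b ≤ l.foldl max b := by
  induction l generalizing b with
  | nil => exact le_rfl
  | cons h t ih => exact le_trans (le_max_left b h) (ih (max b h))

lemma le_foldl_max_nat (l : List Nat) (b : Nat) : ∀ a, a ∈ l → a ≤ l.foldl max b := by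
  induction l generalizing b with
  | nil => intro a ha; cases ha
  | cons h t ih =>
    intro a ha
    rcases List.mem_cons.mp ha with rfl | ha
    · exact le_trans (le_max_right b a) (init_le_foldl_max_nat t (max b a))
    · exact ih (max b h) a ha

-- row lengths are bounded by A's running max
lemma len_le_maxlen (L : List (List Int)) (r : List Int) (hr : r ∈ L) :
    r.length ≤ L.foldl (fun x lis => if lis.length > x then lis.length else x) 0 := by
  have hfun : (fun (x : Nat) (lis : List Int) => if lis.length > x then lis.length else x)
      = (fun (x : Nat) (lis : List Int) => max x lis.length) := by
    funext x lis; by_cases h : lis.length > x <;> simp [h] <;> omega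
  rw [hfun]
  have : L.foldl (fun x lis => max x lis.length) 0 = (L.map List.length).foldl max 0 := by
    induction L generalizing r with
    | nil => rfl
    | cons h t ih => simp [List.foldl_cons, List.foldl_map]
  rw [this]
  exact le_foldl_max_nat _ _ _ (List.mem_map.mpr ⟨r, hr, rfl⟩)

-- pyGetD on zipWith (+) of equal-length vectors splits pointwise
lemma pyGetD_zipWith_add (v r : List Int) (i : Int) (hv : v.length = r.length)
    (h0 : 0 ≤ i) (hi : i < (v.length : Int)) :
    PySem.List.pyGetD (List.zipWith (fun o w => o + w) v r) i 0
      = PySem.List.pyGetD v i 0 + PySem.List.pyGetD r i 0 := by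
  have hz : (List.zipWith (fun o w => o + w) v r).length = v.length := by
    simp [List.length_zipWith, hv]
  rw [PySem.List.pyGetD_eq_getElem (List.zipWith (fun o w => o + w) v r) 0 h0 (by omega),
      PySem.List.pyGetD_eq_getElem v 0 h0 (by omega),
      PySem.List.pyGetD_eq_getElem r 0 h0 (by omega)]
  exact List.getElem_zipWith ..

-- core: row-major accumulation equals column-by-column sums, generalized over the accumulator
lemma accum_eq_columns (x : Nat) (P : List (List Int)) (v : List Int)
    (hv : v.length = x) (hP : ∀ r ∈ P, r.length = x) :
    P.foldl (fun out r => List.zipWith (fun o w => o + w) out r) v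
      = (PySem.List.pyRange 0 (x : Int) 1).map
          (fun i => P.foldl (fun tmp r => tmp + PySem.List.pyGetD r i 0) (PySem.List.pyGetD v i 0)) := by
  induction P generalizing v with
  | nil =>
    simp only [List.foldl_nil]
    have := PySem.List.map_pyGetD_pyRange_zero v (0 : Int)
    rw [← hv] at *
    exact this.symm
  | cons r P ih =>
    have hr : r.length = x := hP r (List.mem_cons_self ..)
    have hv' : (List.zipWith (fun o w => o + w) v r).length = x := by
      simp [List.length_zipWith, hv, hr]
    rw [List.foldl_cons, ih _ hv' (fun s hs => hP s (List.mem_cons_of_mem _ hs))]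
    apply List.map_congr_left
    intro i hi
    have hmem := (PySem.List.mem_pyRange_one (a := 0) (b := (x : Int)) (x := i)).mp hi
    rw [List.foldl_cons,
        pyGetD_zipWith_add v r i (by omega) (by omega) (by simp [hv]; omega)]

theorem column_collapse_eq (L : List (List Int)) :
    column_collapse L = column_collapse_alt L := by
  unfold column_collapse column_collapse_alt
  dsimp only
  rw [← maxlen_eq L]
  set x : Nat := L.foldl (fun x lis => if lis.length > x then lis.length else x) 0 with hx
  -- A's padded list equals the unconditional padding
  have hpad : (L.map (fun lis => if lis.length < x then lis ++ List.replicate (x - lis.length) 0 else lis))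
      = L.map (fun lis => lis ++ List.replicate (x - lis.length) 0) := by
    apply List.map_congr_left
    intro r hr
    by_cases h : r.length < x
    · simp [h]
    · have hle := len_le_maxlen L r hr
      have : r.length = x := by omega
      simp [this]
  rw [hpad]
  set P := L.map (fun lis => lis ++ List.replicate (x - lis.length) 0) with hPdef
  have hPlen : ∀ r ∈ P, r.length = x := by
    intro r hr
    rcases List.mem_map.mp hr with ⟨s, hs, rfl⟩
    have := len_le_maxlen L s hs
    simp; omega
  have hLP : L.length = P.length := by simp [hPdef]
  -- turn A's outer append-loop into a map, and its inner index-loop into a fold over P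
  rw [PySem.List.foldl_append_singleton_eq_map]
  -- B side: the fold over L of zipWith on padded rows is the fold over P
  have hB : L.foldl
      (fun out row => List.zipWith (fun o v => o + v) out (row ++ List.replicate (x - row.length) 0))
      (List.replicate x 0)
      = P.foldl (fun out r => List.zipWith (fun o w => o + w) out r) (List.replicate x 0) := by
    rw [hPdef, List.foldl_map]
  rw [hB, accum_eq_columns x P (List.replicate x 0) (by simp) hPlen]
  apply List.map_congr_left
  intro i hi
  have hmem := (PySem.List.mem_pyRange_one (a := 0) (b := (x : Int)) (x := i)).mp hi
  have hget0 : PySem.List.pyGetD (List.replicate x (0 : Int)) i 0 = 0 := by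
    rw [PySem.List.pyGetD_eq_getElem (List.replicate x (0 : Int)) (0 : Int) (by omega)
          (by simpa using hmem.2)]
    simp
  rw [hget0, hLP]
  exact PySem.List.foldl_pyRange_zero_pyGetD P ([] : List Int)
    (fun tmp r => tmp + PySem.List.pyGetD r i 0) 0

-- ===== VERDICT (by name: the statement is the Claim_ definition above) =====
theorem column_collapse_spec : Claim_equal_column_collapse := by
  intro L _
  unfold Spec_column_collapse
  exact column_collapse_eq L
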